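-- pv_equiv track=rewrite | github.com/NicklasLallo/crypt-calculator | src/crypt_calculator/probability.py | _enumerate_draws
-- ===== SOURCE A (Python) =====
-- from typing import Iterator
--
-- def _enumerate_draws(
--     categories: list[tuple[str | None, int]],
--     draws_left: int,
--     index: int = 0,
--     accum: list[int] | None = None,
-- ) -> Iterator[list[int]]:
--     """Yield every draw vector (one count per category) summing to draws_left.
--
--     Each category has a maximum equal to the deck count for that category.
--     """
--     accum = accum if accum is not None else []
--     if index == len(categories):
--         if draws_left == 0:
--             yield list(accum)
--         return
--     _, deck_count = categories[index]
--     upper = min(deck_count, draws_left)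
--     accum.append(0)
--     for k in range(upper + 1):
--         accum[-1] = k
--         yield from _enumerate_draws(categories, draws_left - k, index + 1, accum)
--     accum.pop()
-- ===== SOURCE B (Python) =====
-- from typing import Iterator
--
-- def _enumerate_draws(
--     categories: list[tuple[str | None, int]],
--     draws_left: int,
--     index: int = 0,
--     accum: list[int] | None = None,
-- ) -> Iterator[list[int]]:
--     """Yield every draw vector (one count per category) summing to draws_left.
--
--     Non-mutating enumerator over the sliced deck list with two-sided pruning:
--     at each deck, a count k is tried only in
--     [max(0, rem - capacity_of_rest), min(deck, rem)], so every branch explored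
--     yields at least one vector.  Vectors are built back-to-front ([k] + tail),
--     in the same ascending lexicographic order.
--     """
--     prefix = list(accum) if accum is not None else []
--     decks = [deck for _, deck in categories[index:]]
--     if any(d < 0 for d in decks):
--         return  # a negative deck count admits no draw at all
--
--     def go(decks: list[int], rem: int) -> Iterator[list[int]]:
--         if not decks:
--             if rem == 0:
--                 yield []
--             return
--         d = decks[0]
--         rest = decks[1:]
--         cap = sum(rest)
--         for k in range(max(0, rem - cap), min(d, rem) + 1):
--             for tail in go(rest, rem - k):
--                 yield [k] + tail
--
--     for v in go(decks, draws_left):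
--         yield prefix + v
-- ===== Notes on version B (the rewrite author's own statement) =====
-- stated objective: alternative
-- what changed: Replaces A's accumulator-mutating recursion over (categories, index) with only an upper bound on each count by a non-mutating enumerator over the sliced deck list that precomputes the rest's capacity and prunes each count from BOTH sides, building vectors back-to-front; it trades A's shared-accumulator DFS for a self-contained generator whose every explored branch yields a vector.
-- intended difference: On negative in-range index where either side yields any vector, A's negative-index wraparound enumerates the wrapped tail categories and then ALL categories again (e.g. [[7,0,0,0]] at the witness), while B enumerates exactly categories[index:] ([[7,0]]), the intended meaning of 'continue from position index'. — e.g. on _enumerate_draws([(none, 2), (none, 1)], 0, -1, some [7]): A returns [[7, 0, 0, 0]], B returns [[7, 0]]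
import Mathlib
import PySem

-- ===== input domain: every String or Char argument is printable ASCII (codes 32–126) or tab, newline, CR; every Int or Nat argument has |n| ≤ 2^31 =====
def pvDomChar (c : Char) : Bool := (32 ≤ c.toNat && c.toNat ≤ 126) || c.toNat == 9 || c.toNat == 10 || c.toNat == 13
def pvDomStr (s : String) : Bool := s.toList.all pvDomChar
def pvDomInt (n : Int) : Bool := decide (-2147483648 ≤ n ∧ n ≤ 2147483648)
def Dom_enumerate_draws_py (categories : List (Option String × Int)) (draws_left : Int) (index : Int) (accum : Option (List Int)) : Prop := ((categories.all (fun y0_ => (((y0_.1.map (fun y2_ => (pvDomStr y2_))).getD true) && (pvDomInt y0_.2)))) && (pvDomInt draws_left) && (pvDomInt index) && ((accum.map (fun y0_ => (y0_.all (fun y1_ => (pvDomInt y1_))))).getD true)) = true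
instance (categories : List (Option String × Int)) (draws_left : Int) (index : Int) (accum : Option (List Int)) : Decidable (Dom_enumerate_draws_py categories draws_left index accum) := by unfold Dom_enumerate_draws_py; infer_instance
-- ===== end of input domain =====

-- B replaces A's accumulator-threading, upper-bound-only recursion by a non-mutating
-- enumerator over the sliced deck list that prunes each count from both sides (lower bound
-- from the remaining capacity) and builds vectors back-to-front.
-- Equivalence is about the RETURN value only: A temporarily mutates `accum` while iterating
-- (append/pop, net effect nil); B only reads it.

-- ===== PORT A =====
def enumerate_draws_py (categories : List (Option String × Int)) (draws_left : Int) (index : Int) (accum : Option (List Int)) : List (List Int) :=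
  -- accum = accum if accum is not None else []
  let acc := accum.getD []
  if index = (categories.length : Int) then
    if draws_left = 0 then [acc] else []
  else
    match h : PySem.List.pyGet? categories index with
    | none => []   -- categories[index] raises IndexError here; excluded by Pre_
    | some cat =>
      -- upper = min(deck_count, draws_left); for k in range(upper + 1): yield from recursion
      (PySem.List.pyRange 0 (min cat.2 draws_left + 1) 1).flatMap
        (fun k => enumerate_draws_py categories (draws_left - k) (index + 1) (some (acc ++ [k])))
termination_by ((categories.length : Int) - index).toNat
decreasing_by
  simp only [PySem.List.pyGet?, PySem.List.pyIdx?] at h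
  split_ifs at h <;> simp_all <;> omega

-- ===== PORT B =====
-- B-side helper: `go` — enumerate the capped vectors over `decks` summing to `rem`,
-- back-to-front, pruning k from both sides (lower bound from the rest's capacity)
def pyGo (decks : List Int) (rem : Int) : List (List Int) :=
  match decks with
  | [] => if rem = 0 then [[]] else []
  | d :: rest =>
    let cap := rest.sum
    (PySem.List.pyRange (max 0 (rem - cap)) (min d rem + 1) 1).flatMap
      (fun k => (pyGo rest (rem - k)).map (fun tail => [k] ++ tail))

def enumerate_draws_py_alt (categories : List (Option String × Int)) (draws_left : Int) (index : Int) (accum : Option (List Int)) : List (List Int) :=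
  let pre := accum.getD []
  let decks := (PySem.List.slice categories (some index) none).map Prod.snd
  if decks.any (fun d => decide (d < 0)) then []
  else (pyGo decks draws_left).map (fun v => pre ++ v)

-- ===== PRECONDITION & SPEC =====
-- Pre_ excludes exactly the inputs where A raises IndexError (categories[index] out of range).
def Pre_enumerate_draws_py (categories : List (Option String × Int)) (draws_left : Int) (index : Int) (accum : Option (List Int)) : Prop :=
  -(categories.length : Int) ≤ index ∧ index ≤ (categories.length : Int)
instance (categories : List (Option String × Int)) (draws_left : Int) (index : Int) (accum : Option (List Int)) : Decidable (Pre_enumerate_draws_py categories draws_left index accum) := by unfold Pre_enumerate_draws_py; infer_instance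
def pvWitness_enumerate_draws_py : (List (Option String × Int)) × Int × Int × Option (List Int) := ([(some "a", 2)], 1, 0, none)

-- On negative in-range index, A's Python negative-index wraparound enumerates the wrapped tail
-- categories AND THEN all categories again (one count per tail category plus one per category),
-- while B enumerates exactly categories[index:] as the "continue from position index" contract
-- intends; D_ is the set of such inputs on which at least one side yields a vector (a capped
-- draw vector summing to draws_left exists over the tail decks, or over tail-then-all decks).
def D_enumerate_draws_py (categories : List (Option String × Int)) (draws_left : Int) (index : Int) (accum : Option (List Int)) : Prop :=
  let tail := (categories.drop (categories.length - index.natAbs)).map Prod.snd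
  let feas := fun l : List Int => 0 ≤ l.foldr min 0 ∧ draws_left ≤ l.sum
  index < 0 ∧ 0 ≤ draws_left ∧ (feas tail ∨ feas (tail ++ categories.map Prod.snd))
instance (categories : List (Option String × Int)) (draws_left : Int) (index : Int) (accum : Option (List Int)) : Decidable (D_enumerate_draws_py categories draws_left index accum) := by unfold D_enumerate_draws_py; dsimp only; infer_instance

def Spec_enumerate_draws_py (categories : List (Option String × Int)) (draws_left : Int) (index : Int) (accum : Option (List Int)) (out : List (List Int)) : Prop := ¬ D_enumerate_draws_py categories draws_left index accum → out = enumerate_draws_py_alt categories draws_left index accum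
instance (categories : List (Option String × Int)) (draws_left : Int) (index : Int) (accum : Option (List Int)) (out : List (List Int)) : Decidable (Spec_enumerate_draws_py categories draws_left index accum out) := by unfold Spec_enumerate_draws_py; infer_instance

def pvDiffWitness_enumerate_draws_py : (List (Option String × Int)) × Int × Int × Option (List Int) := ([(none, 2), (none, 1)], 0, -1, some [7])
def pvDiffWitnessOut_enumerate_draws_py : (List (List Int)) × (List (List Int)) := ([[7, 0, 0, 0]], [[7, 0]])

-- ===== CLAIM (what is proved, stated in full; the proofs are below) =====
def Claim_unchanged_enumerate_draws_py : Prop := ∀ (categories : List (Option String × Int)) (draws_left : Int) (index : Int) (accum : Option (List Int)), Dom_enumerate_draws_py categories draws_left index accum → Pre_enumerate_draws_py categories draws_left index accum → Spec_enumerate_draws_py categories draws_left index accum (enumerate_draws_py categories draws_left index accum)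
def Claim_changed_enumerate_draws_py : Prop := Dom_enumerate_draws_py (pvDiffWitness_enumerate_draws_py.1) (pvDiffWitness_enumerate_draws_py.2.1) (pvDiffWitness_enumerate_draws_py.2.2.1) (pvDiffWitness_enumerate_draws_py.2.2.2) ∧ Pre_enumerate_draws_py (pvDiffWitness_enumerate_draws_py.1) (pvDiffWitness_enumerate_draws_py.2.1) (pvDiffWitness_enumerate_draws_py.2.2.1) (pvDiffWitness_enumerate_draws_py.2.2.2) ∧ D_enumerate_draws_py (pvDiffWitness_enumerate_draws_py.1) (pvDiffWitness_enumerate_draws_py.2.1) (pvDiffWitness_enumerate_draws_py.2.2.1) (pvDiffWitness_enumerate_draws_py.2.2.2) ∧ enumerate_draws_py (pvDiffWitness_enumerate_draws_py.1) (pvDiffWitness_enumerate_draws_py.2.1) (pvDiffWitness_enumerate_draws_py.2.2.1) (pvDiffWitness_enumerate_draws_py.2.2.2) = pvDiffWitnessOut_enumerate_draws_py.1 ∧ enumerate_draws_py_alt (pvDiffWitness_enumerate_draws_py.1) (pvDiffWitness_enumerate_draws_py.2.1) (pvDiffWitness_enumerate_draws_py.2.2.1) (pvDiffWitness_enumerate_draws_py.2.2.2)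 = pvDiffWitnessOut_enumerate_draws_py.2 ∧ pvDiffWitnessOut_enumerate_draws_py.1 ≠ pvDiffWitnessOut_enumerate_draws_py.2
def Claim_exact_enumerate_draws_py : Prop := ∀ (categories : List (Option String × Int)) (draws_left : Int) (index : Int) (accum : Option (List Int)), Dom_enumerate_draws_py categories draws_left index accum → Pre_enumerate_draws_py categories draws_left index accum → D_enumerate_draws_py categories draws_left index accum → enumerate_draws_py categories draws_left index accum ≠ enumerate_draws_py_alt categories draws_left index accum

-- ===== LEMMAS AND PROOFS =====

-- a capped draw vector over these deck counts summing to dl exists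
abbrev pvFeasible (decks : List Int) (dl : Int) : Prop :=
  (∀ d ∈ decks, 0 ≤ d) ∧ 0 ≤ dl ∧ dl ≤ decks.sum

lemma pv_foldr_min (l : List Int) : (∀ d ∈ l, 0 ≤ d) ↔ 0 ≤ l.foldr min 0 := by
  induction l with
  | nil => simp
  | cons d ds ih => simp [List.foldr_cons, ← ih]

-- proof-side product: all capped tuples over decks, filtered to sum dl, with prefix pre
def pvProd : List (List Int) → List (List Int)
  | [] => [[]]
  | r :: rs => r.flatMap (fun k => (pvProd rs).map (fun v => k :: v))

def pvF (decks : List Int) (dl : Int) (pre : List Int) : List (List Int) :=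
  (pvProd (decks.map (fun d => PySem.List.pyRange 0 (d + 1) 1))).filterMap
    (fun v => if v.sum = dl then some (pre ++ v) else none)

-- the deck counts A actually walks from position `index` (wrapped tail, then everything, for index < 0)
def pvV (cats : List (Option String × Int)) (index : Int) : List Int :=
  if 0 ≤ index then (cats.drop index.toNat).map Prod.snd
  else (cats.drop ((cats.length : Int) + index).toNat).map Prod.snd ++ cats.map Prod.snd

lemma pv_len_mem_pvProd (rs : List (List Int)) (v : List Int) (h : v ∈ pvProd rs) :
    v.length = rs.length := by
  induction rs generalizing v with
  | nil => simp [pvProd] at h; simp [h]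
  | cons r rs ih =>
    simp only [pvProd, List.mem_flatMap, List.mem_map] at h
    obtain ⟨k, hk, v', hv', rfl⟩ := h
    simp [ih v' hv']

lemma pv_sum_mem_pvProd (decks : List Int) (v : List Int)
    (h : v ∈ pvProd (decks.map (fun d => PySem.List.pyRange 0 (d + 1) 1))) :
    0 ≤ v.sum ∧ v.sum ≤ decks.sum := by
  induction decks generalizing v with
  | nil => simp [pvProd] at h; simp [h]
  | cons d ds ih =>
    simp only [List.map_cons, pvProd, List.mem_flatMap, List.mem_map] at h
    obtain ⟨k, hk, v', hv', rfl⟩ := h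
    rw [PySem.List.mem_pyRange_one] at hk
    have := ih v' hv'
    simp only [List.sum_cons]
    omega

lemma pv_pvProd_nil (decks : List Int) (d : Int) (hd : d ∈ decks) (hneg : d < 0) :
    pvProd (decks.map (fun d => PySem.List.pyRange 0 (d + 1) 1)) = [] := by
  induction decks with
  | nil => simp at hd
  | cons e ds ih =>
    rcases List.mem_cons.mp hd with rfl | hd'
    · simp [pvProd, PySem.List.pyRange_one_eq_nil (by omega : d + 1 ≤ 0)]
    · simp [pvProd, ih hd']

lemma pv_exists_mem_pvProd (decks : List Int) (dl : Int) (h : pvFeasible decks dl) :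
    ∃ v ∈ pvProd (decks.map (fun d => PySem.List.pyRange 0 (d + 1) 1)), v.sum = dl := by
  obtain ⟨hall, hdl0, hdls⟩ := h
  induction decks generalizing dl with
  | nil => exact ⟨[], by simp [pvProd], by simp at hdls ⊢; omega⟩
  | cons d ds ih =>
    have hd : 0 ≤ d := hall d (by simp)
    have hsum : 0 ≤ ds.sum := List.sum_nonneg (fun x hx => hall x (by simp [hx]))
    simp only [List.sum_cons] at hdls
    obtain ⟨v, hv, hvs⟩ := ih (dl - min d dl) (fun x hx => hall x (by simp [hx])) (by omega) (by omega)
    refine ⟨min d dl :: v, ?_, by simp [hvs]⟩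
    simp only [List.map_cons, pvProd, List.mem_flatMap, List.mem_map]
    exact ⟨min d dl, by rw [PySem.List.mem_pyRange_one]; omega, v, hv, rfl⟩

lemma pvF_nil (decks : List Int) (dl : Int) (pre : List Int) (h : ¬ pvFeasible decks dl) :
    pvF decks dl pre = [] := by
  unfold pvF
  simp only [pvFeasible, not_and_or, not_forall] at h
  rcases h with h | h
  · push Not at h
    obtain ⟨d, hd, hneg⟩ := h
    rw [pv_pvProd_nil decks d hd (by omega)]
    rfl
  · rw [List.filterMap_eq_nil_iff]
    intro v hv
    have := pv_sum_mem_pvProd decks v hv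
    rw [if_neg (by omega)]

lemma pvF_ne_nil (decks : List Int) (dl : Int) (pre : List Int) (h : pvFeasible decks dl) :
    pvF decks dl pre ≠ [] := by
  obtain ⟨v, hv, hvs⟩ := pv_exists_mem_pvProd decks dl h
  have : pre ++ v ∈ pvF decks dl pre := by
    unfold pvF
    rw [List.mem_filterMap]
    exact ⟨v, hv, by rw [if_pos hvs]⟩
  exact List.ne_nil_of_mem this

lemma pv_len_mem_pvF (decks : List Int) (dl : Int) (pre w : List Int) (h : w ∈ pvF decks dl pre) :
    w.length = pre.length + decks.length := by
  unfold pvF at h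
  rw [List.mem_filterMap] at h
  obtain ⟨v, hv, hw⟩ := h
  split_ifs at hw
  simp only [Option.some.injEq] at hw
  subst hw
  have := pv_len_mem_pvProd _ v hv
  simp at this
  simp [this]

lemma pvF_cons_full (d : Int) (ds : List Int) (dl : Int) (pre : List Int) :
    pvF (d :: ds) dl pre
      = (PySem.List.pyRange 0 (d + 1) 1).flatMap
          (fun k => pvF ds (dl - k) (pre ++ [k])) := by
  unfold pvF
  simp only [List.map_cons, pvProd, List.filterMap_flatMap, List.filterMap_map]
  congr 1
  funext k
  congr 1
  funext v
  simp only [Function.comp, List.sum_cons]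
  by_cases hs : v.sum = dl - k
  · rw [if_pos (by omega), if_pos hs]
    simp
  · rw [if_neg (by omega), if_neg hs]

lemma pvF_cons (d : Int) (ds : List Int) (dl : Int) (pre : List Int) :
    pvF (d :: ds) dl pre
      = (PySem.List.pyRange 0 (min d dl + 1) 1).flatMap
          (fun k => pvF ds (dl - k) (pre ++ [k])) := by
  rw [pvF_cons_full]
  rcases le_or_gt d dl with h | h
  · have hmin : min d dl = d := by omega
    rw [hmin]
  · have hmin : min d dl = dl := by omega
    rw [hmin]
    rcases le_or_gt 0 dl with h0 | h0
    · rw [PySem.List.pyRange_one_append 0 (dl + 1) (d + 1) (by omega) (by omega),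
        List.flatMap_append]
      have : ∀ k ∈ PySem.List.pyRange (dl + 1) (d + 1) 1, pvF ds (dl - k) (pre ++ [k]) = [] := by
        intro k hk
        rw [PySem.List.mem_pyRange_one] at hk
        exact pvF_nil _ _ _ (by simp only [pvFeasible, not_and_or]; right; left; omega)
      rw [List.flatMap_eq_nil_iff.mpr this, List.append_nil]
    · rw [PySem.List.pyRange_one_eq_nil (a := 0) (b := dl + 1) (by omega)]
      have : ∀ k ∈ PySem.List.pyRange 0 (d + 1) 1, pvF ds (dl - k) (pre ++ [k]) = [] := by
        intro k hk
        rw [PySem.List.mem_pyRange_one] at hk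
        exact pvF_nil _ _ _ (by simp only [pvFeasible, not_and_or]; right; left; omega)
      rw [List.flatMap_eq_nil_iff.mpr this]
      rfl

lemma pvV_cons_nonneg (cats : List (Option String × Int)) (index : Int)
    (h1 : 0 ≤ index) (h2 : index < (cats.length : Int)) (hp : index.toNat < cats.length) :
    pvV cats index = (cats[index.toNat]).2 :: pvV cats (index + 1) := by
  unfold pvV
  rw [if_pos h1, if_pos (by omega : (0:Int) ≤ index + 1)]
  rw [List.drop_eq_getElem_cons hp, List.map_cons]
  have : (index + 1).toNat = index.toNat + 1 := by omega
  rw [this]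

lemma pvV_cons_neg (cats : List (Option String × Int)) (index : Int)
    (h1 : -(cats.length : Int) ≤ index) (h2 : index < 0)
    (hp : ((cats.length : Int) + index).toNat < cats.length) :
    pvV cats index = (cats[((cats.length : Int) + index).toNat]).2 :: pvV cats (index + 1) := by
  unfold pvV
  rw [if_neg (by omega)]
  rw [List.drop_eq_getElem_cons hp, List.map_cons, List.cons_append]
  rcases eq_or_lt_of_le (by omega : index + 1 ≤ 0) with h0 | h0
  · rw [if_pos (by omega)]
    have hlen : ((cats.length : Int) + index).toNat + 1 = cats.length := by omega
    have h0' : (index + 1).toNat = 0 := by omega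
    rw [hlen, h0', List.drop_length, List.drop_zero, List.map_nil, List.nil_append]
  · rw [if_neg (by omega)]
    have : ((cats.length : Int) + (index + 1)).toNat = ((cats.length : Int) + index).toNat + 1 := by omega
    rw [this]

lemma pv_pyGet_neg (xs : List (Option String × Int)) (i : Int) (h1 : -(xs.length:Int) ≤ i) (h2 : i < 0) :
    PySem.List.pyGet? xs i = xs[((xs.length:Int)+i).toNat]? := by
  simp only [PySem.List.pyGet?, PySem.List.pyIdx?]
  have : ¬ (0 ≤ i) := by omega
  rw [if_neg this, if_pos h1]
  have : xs.length - (-i).toNat = ((xs.length:Int)+i).toNat := by omega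
  simp [this]

lemma pv_main (cats : List (Option String × Int)) (m : Nat) :
    ∀ (dl index : Int) (accum : Option (List Int)),
      -(cats.length : Int) ≤ index → index ≤ (cats.length : Int) →
      ((cats.length : Int) - index).toNat = m →
      enumerate_draws_py cats dl index accum = pvF (pvV cats index) dl (accum.getD []) := by
  induction m with
  | zero =>
    intro dl index accum h1 h2 hm
    have hix : index = (cats.length : Int) := by omega
    rw [enumerate_draws_py]
    rw [if_pos hix]
    have : pvV cats index = [] := by
      unfold pvV
      rw [if_pos (by omega), hix]
      simp
    rw [this]
    unfold pvF pvProd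
    simp only [List.map_nil, List.filterMap, List.sum_nil]
    by_cases hdl : dl = 0
    · subst hdl; simp
    · rw [if_neg hdl]
      rw [if_neg (fun h : (0:Int) = dl => hdl h.symm)]
  | succ m ih =>
    intro dl index accum h1 h2 hm
    have hlt : index < (cats.length : Int) := by omega
    have hne : ¬ (index = (cats.length : Int)) := by omega
    by_cases hsgn : 0 ≤ index
    · have hp : index.toNat < cats.length := by omega
      have hget : PySem.List.pyGet? cats index = some cats[index.toNat] :=
        PySem.List.pyGet?_eq_some_getElem cats hsgn (by simpa using hlt)
      rw [enumerate_draws_py]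
      rw [if_neg hne]
      split
      next heq => rw [hget] at heq; exact absurd heq (by simp)
      next cat heq =>
      rw [hget] at heq
      obtain rfl := (Option.some_inj.mp heq).symm
      have hrec : ∀ k : Int,
          enumerate_draws_py cats (dl - k) (index + 1) (some (accum.getD [] ++ [k]))
            = pvF (pvV cats (index + 1)) (dl - k) (accum.getD [] ++ [k]) := by
        intro k
        simpa using ih (dl - k) (index + 1) (some (accum.getD [] ++ [k])) (by omega) (by omega) (by omega)
      simp only [hrec]
      rw [← pvF_cons, ← pvV_cons_nonneg cats index hsgn hlt hp]
    · have hp : ((cats.length : Int) + index).toNat < cats.length := by omega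
      have hget : PySem.List.pyGet? cats index = some cats[((cats.length:Int)+index).toNat] := by
        rw [pv_pyGet_neg cats index h1 (by omega)]
        exact List.getElem?_eq_getElem hp
      rw [enumerate_draws_py]
      rw [if_neg hne]
      split
      next heq => rw [hget] at heq; exact absurd heq (by simp)
      next cat heq =>
      rw [hget] at heq
      obtain rfl := (Option.some_inj.mp heq).symm
      have hrec : ∀ k : Int,
          enumerate_draws_py cats (dl - k) (index + 1) (some (accum.getD [] ++ [k]))
            = pvF (pvV cats (index + 1)) (dl - k) (accum.getD [] ++ [k]) := by
        intro k
        simpa using ih (dl - k) (index + 1) (some (accum.getD [] ++ [k])) (by omega) (by omega) (by omega)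
      simp only [hrec]
      rw [← pvF_cons, ← pvV_cons_neg cats index h1 (by omega) hp]

lemma pv_go_eq (decks : List Int) : ∀ (dl : Int) (pre : List Int), (∀ d ∈ decks, 0 ≤ d) →
    (pyGo decks dl).map (fun v => pre ++ v) = pvF decks dl pre := by
  induction decks with
  | nil =>
    intro dl pre _
    unfold pyGo pvF pvProd
    simp only [List.map_nil, List.filterMap, List.sum_nil]
    by_cases hdl : dl = 0
    · subst hdl; simp
    · rw [if_neg hdl, if_neg (fun h : (0:Int) = dl => hdl h.symm)]
      rfl
  | cons d rest ih =>
    intro dl pre hnn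
    have hrest : ∀ x ∈ rest, 0 ≤ x := fun x hx => hnn x (by simp [hx])
    have hcap : 0 ≤ rest.sum := List.sum_nonneg hrest
    unfold pyGo
    rw [List.map_flatMap]
    have hinner : ∀ k : Int,
        ((pyGo rest (dl - k)).map (fun tail => [k] ++ tail)).map (fun v => pre ++ v)
          = pvF rest (dl - k) (pre ++ [k]) := by
      intro k
      rw [List.map_map, ← ih (dl - k) (pre ++ [k]) hrest]
      simp [Function.comp]
    simp only [hinner]
    rw [pvF_cons]
    rcases le_or_gt (dl - rest.sum) 0 with hlo | hlo
    · rw [max_eq_left (by omega)]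
    · rw [max_eq_right (by omega)]
      rcases le_or_gt (dl - rest.sum) (min d dl + 1) with hle | hgt
      · rw [PySem.List.pyRange_one_append 0 (dl - rest.sum) (min d dl + 1) (by omega) hle,
          List.flatMap_append]
        have : ∀ k ∈ PySem.List.pyRange 0 (dl - rest.sum) 1,
            pvF rest (dl - k) (pre ++ [k]) = [] := by
          intro k hk
          rw [PySem.List.mem_pyRange_one] at hk
          exact pvF_nil _ _ _ (by simp only [pvFeasible, not_and_or]; right; right; omega)
        rw [List.flatMap_eq_nil_iff.mpr this, List.nil_append]
      · rw [PySem.List.pyRange_one_eq_nil (a := dl - rest.sum) (b := min d dl + 1) (by omega)]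
        have : ∀ k ∈ PySem.List.pyRange 0 (min d dl + 1) 1,
            pvF rest (dl - k) (pre ++ [k]) = [] := by
          intro k hk
          rw [PySem.List.mem_pyRange_one] at hk
          exact pvF_nil _ _ _ (by simp only [pvFeasible, not_and_or]; right; right; omega)
        rw [List.flatMap_eq_nil_iff.mpr this]
        rfl

lemma pv_alt_eq (cats : List (Option String × Int)) (dl index : Int) (accum : Option (List Int)) :
    enumerate_draws_py_alt cats dl index accum
      = pvF ((PySem.List.slice cats (some index) none).map Prod.snd) dl (accum.getD []) := by
  unfold enumerate_draws_py_alt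
  by_cases hneg : ((PySem.List.slice cats (some index) none).map Prod.snd).any (fun d => decide (d < 0)) = true
  · rw [if_pos hneg]
    rw [List.any_eq_true] at hneg
    obtain ⟨d, hd, hdneg⟩ := hneg
    rw [pvF_nil _ _ _ (by
      simp only [pvFeasible, not_and_or, not_forall]
      left
      exact ⟨d, hd, by simpa using hdneg⟩)]
  · rw [if_neg hneg]
    refine pv_go_eq _ dl _ (fun x hx => ?_)
    by_contra hx0
    exact hneg (List.any_eq_true.mpr ⟨x, hx, by simpa using hx0⟩)

lemma pv_slice_neg (cats : List (Option String × Int)) (index : Int)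
    (h1 : -(cats.length : Int) ≤ index) (h2 : index < 0) :
    PySem.List.slice cats (some index) none = cats.drop ((cats.length : Int) + index).toNat := by
  rw [PySem.List.slice_some_none, PySem.List.clampIdx]
  split_ifs <;> (try rfl) <;> omega

-- ===== VERDICT (by name: the statement is the Claim_ definition above) =====
theorem enumerate_draws_py_spec : Claim_unchanged_enumerate_draws_py := by
  intro cats dl index accum _ hpre hD
  obtain ⟨h1, h2⟩ := hpre
  unfold D_enumerate_draws_py at hD
  rw [pv_main cats ((cats.length : Int) - index).toNat dl index accum h1 h2 rfl, pv_alt_eq]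
  rcases le_or_gt 0 index with hs | hs
  · rw [PySem.List.slice_from cats hs]
    unfold pvV
    rw [if_pos hs]
  · rw [pv_slice_neg cats index h1 hs]
    unfold pvV
    rw [if_neg (by omega)]
    have hidx : cats.length - index.natAbs = ((cats.length : Int) + index).toNat := by omega
    rw [← hidx]
    have hfB : ¬ pvFeasible ((cats.drop (cats.length - index.natAbs)).map Prod.snd) dl :=
      fun hf => hD ⟨hs, hf.2.1, Or.inl ⟨(pv_foldr_min _).mp hf.1, hf.2.2⟩⟩
    have hfA : ¬ pvFeasible ((cats.drop (cats.length - index.natAbs)).map Prod.snd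
        ++ cats.map Prod.snd) dl :=
      fun hf => hD ⟨hs, hf.2.1, Or.inr ⟨(pv_foldr_min _).mp hf.1, hf.2.2⟩⟩
    rw [pvF_nil _ _ _ hfA, pvF_nil _ _ _ hfB]

theorem enumerate_draws_py_changed : Claim_changed_enumerate_draws_py := by
  unfold Claim_changed_enumerate_draws_py
  refine ⟨by decide, by decide, by decide, ?_, by decide, by decide⟩
  show enumerate_draws_py [(none, 2), (none, 1)] 0 (-1) (some [7]) = [[7, 0, 0, 0]]
  rw [pv_main _ 3 0 (-1) (some [7]) (by decide) (by decide) (by decide)]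
  decide

theorem enumerate_draws_py_tight : Claim_exact_enumerate_draws_py := by
  intro cats dl index accum _ hpre hD
  unfold D_enumerate_draws_py at hD
  obtain ⟨hs, hdl0, hor⟩ := hD
  obtain ⟨h1, h2⟩ := hpre
  rw [pv_main cats ((cats.length : Int) - index).toNat dl index accum h1 h2 rfl, pv_alt_eq,
    pv_slice_neg cats index h1 hs]
  unfold pvV
  rw [if_neg (by omega)]
  rw [show ((cats.length : Int) + index).toNat = cats.length - index.natAbs from by omega]
  intro heq
  rcases hor with ⟨ha, hsum⟩ | ⟨ha, hsum⟩
  · obtain ⟨w, hw⟩ := List.exists_mem_of_ne_nil _ (pvF_ne_nil _ _ _ ⟨(pv_foldr_min _).mpr ha, hdl0, hsum⟩)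
    have lenB := pv_len_mem_pvF _ _ _ _ hw
    have lenA := pv_len_mem_pvF _ _ _ _ (heq ▸ hw)
    simp only [List.length_append, List.length_map] at lenA lenB
    omega
  · obtain ⟨w, hw⟩ := List.exists_mem_of_ne_nil _ (pvF_ne_nil _ _ _ ⟨(pv_foldr_min _).mpr ha, hdl0, hsum⟩)
    have lenA := pv_len_mem_pvF _ _ _ _ hw
    have lenB := pv_len_mem_pvF _ _ _ _ (heq ▸ hw)
    simp only [List.length_append, List.length_map] at lenA lenB
    omega
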